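-- pv_equiv track=rewrite | github.com/HassanSalah120/Best-Practices-Doctor | backend/rules/react/missing_usememo_for_expensive_calc.py | _find_matching_paren
-- ===== SOURCE A (Python) =====
-- def _find_matching_paren(text: str, start: int) -> int:
--     depth = 0
--     in_single = False
--     in_double = False
--     in_backtick = False
--     in_line_comment = False
--     in_block_comment = False
--     escaped = False
--
--     for i in range(start, len(text)):
--         ch = text[i]
--         nxt = text[i + 1] if i + 1 < len(text) else ""
--
--         if in_line_comment:
--             if ch == "\n":
--                 in_line_comment = False
--             continue
--
--         if in_block_comment:
--             if ch == "*" and nxt == "/":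
--                 in_block_comment = False
--             continue
--
--         if escaped:
--             escaped = False
--             continue
--
--         if ch == "\\" and (in_single or in_double or in_backtick):
--             escaped = True
--             continue
--
--         if in_single:
--             if ch == "'":
--                 in_single = False
--             continue
--
--         if in_double:
--             if ch == '"':
--                 in_double = False
--             continue
--
--         if in_backtick:
--             if ch == "`":
--                 in_backtick = False
--             continue
--
--         if ch == "/" and nxt == "/":
--             in_line_comment = True
--             continue
--         if ch == "/" and nxt == "*":
--             in_block_comment = True
--             continue
--
--         if ch == "'":
--             in_single = True
--             continue
--         if ch == '"':
--             in_double = True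
--             continue
--         if ch == "`":
--             in_backtick = True
--             continue
--
--         if ch == "(":
--             depth += 1
--             continue
--         if ch == ")":
--             depth -= 1
--             if depth == 0:
--                 return i
--             continue
--
--     return -1
-- ===== SOURCE B (Python) =====
-- def _find_matching_paren(text: str, start: int) -> int:
--     n = len(text)
--     depth = 0
--     i = start
--     while i < n:
--         ch = text[i]
--         nxt = text[i + 1] if i + 1 < n else ""
--         if ch == "/" and nxt == "/":
--             j = i + 1
--             while j < n and text[j] != "\n":
--                 j += 1
--             i = j + 1
--             continue
--         if ch == "/" and nxt == "*":
--             j = i + 1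
--             while j < n and not (text[j] == "*" and j + 1 < n and text[j + 1] == "/"):
--                 j += 1
--             i = j + 1
--             continue
--         if ch == "'" or ch == '"' or ch == "`":
--             j = i + 1
--             while j < n:
--                 cj = text[j]
--                 if cj == "\\":
--                     j += 2
--                 elif cj == ch:
--                     j += 1
--                     break
--                 else:
--                     j += 1
--             i = j
--             continue
--         if ch == "(":
--             depth += 1
--         elif ch == ")":
--             depth -= 1
--             if depth == 0:
--                 return i
--         i += 1
--     return -1
-- ===== Notes on version B (the rewrite author's own statement) =====
-- stated objective: alternative
-- what changed: Replaced the six persistent state flags (in_single/in_double/in_backtick/line-comment/block-comment/escaped) driving one big per-character state machine by a while-loop that keeps only a depth counter and, on meeting a quote or comment opener, skips the whole string/comment region inline with a dedicated inner scan.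
import Mathlib
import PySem

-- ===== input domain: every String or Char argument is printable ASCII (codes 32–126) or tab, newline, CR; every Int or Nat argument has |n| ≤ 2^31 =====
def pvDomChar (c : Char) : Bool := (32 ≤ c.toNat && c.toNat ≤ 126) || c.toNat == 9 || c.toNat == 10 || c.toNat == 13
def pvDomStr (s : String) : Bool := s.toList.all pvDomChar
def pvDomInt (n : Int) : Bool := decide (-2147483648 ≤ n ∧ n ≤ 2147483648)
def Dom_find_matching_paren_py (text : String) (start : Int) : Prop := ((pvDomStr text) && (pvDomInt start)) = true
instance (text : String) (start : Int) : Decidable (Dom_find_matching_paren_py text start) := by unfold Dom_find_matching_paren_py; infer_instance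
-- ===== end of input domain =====

-- B replaces A's six persistent per-character state flags by a while loop keeping only a depth
-- counter, skipping each whole string/comment region with a dedicated inner scan (objective:
-- alternative decomposition, same asymptotic cost).
-- The Nat `fuel` parameter of every loop below only makes its recursion structural; the wrappers
-- pass fuel that is always sufficient, so it never alters a result.

-- ===== PORT A =====
-- A's for-loop over range(start, len(text)) with state (depth, six booleans); text[i] is
-- PySem.List.pyGet? (exact Python indexing incl. negative wraparound); the `none` branch is
-- Python's IndexError, unreachable under Pre_ (start ≥ -len(text)).
def findA (cs : List Char) (fuel : Nat) (i depth : Int)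
    (inS inD inB inLC inBC esc : Bool) : Int :=
  match fuel with
  | 0 => -1
  | Nat.succ f =>
    if i < (cs.length : Int) then
      match PySem.List.pyGet? cs i with
      | none => -1
      | some ch =>
        let nxt : Option Char := if i + 1 < (cs.length : Int) then PySem.List.pyGet? cs (i+1) else none
        if inLC then
          findA cs f (i+1) depth inS inD inB (!(ch == '\n')) inBC esc
        else if inBC then
          findA cs f (i+1) depth inS inD inB inLC (!(ch == '*' && nxt == some '/')) esc
        else if esc then
          findA cs f (i+1) depth inS inD inB inLC inBC false
        else if ch == '\\' && (inS || inD || inB) then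
          findA cs f (i+1) depth inS inD inB inLC inBC true
        else if inS then
          findA cs f (i+1) depth (!(ch == '\'')) inD inB inLC inBC esc
        else if inD then
          findA cs f (i+1) depth inS (!(ch == '"')) inB inLC inBC esc
        else if inB then
          findA cs f (i+1) depth inS inD (!(ch == '`')) inLC inBC esc
        else if ch == '/' && nxt == some '/' then
          findA cs f (i+1) depth inS inD inB true inBC esc
        else if ch == '/' && nxt == some '*' then
          findA cs f (i+1) depth inS inD inB inLC true esc
        else if ch == '\'' then
          findA cs f (i+1) depth true inD inB inLC inBC esc
        else if ch == '"' then
          findA cs f (i+1) depth inS true inB inLC inBC esc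
        else if ch == '`' then
          findA cs f (i+1) depth inS inD true inLC inBC esc
        else if ch == '(' then
          findA cs f (i+1) (depth+1) inS inD inB inLC inBC esc
        else if ch == ')' then
          if depth - 1 == 0 then i
          else findA cs f (i+1) (depth-1) inS inD inB inLC inBC esc
        else
          findA cs f (i+1) depth inS inD inB inLC inBC esc
    else -1

def find_matching_paren_py (text : String) (start : Int) : Int :=
  findA text.toList ((text.toList.length - start).toNat + 1) start 0 false false false false false false

-- ===== PORT B =====
-- inner loop: while j < n and text[j] != '\n': j += 1   (returns the final j)
def skipLineB (cs : List Char) (fuel : Nat) (j : Int) : Int :=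
  match fuel with
  | 0 => j
  | Nat.succ f =>
    if j < (cs.length : Int) then
      match PySem.List.pyGet? cs j with
      | none => j
      | some c => if c == '\n' then j else skipLineB cs f (j+1)
    else j

-- inner loop: while j < n and not (text[j] == '*' and j+1 < n and text[j+1] == '/'): j += 1
def skipBlockB (cs : List Char) (fuel : Nat) (j : Int) : Int :=
  match fuel with
  | 0 => j
  | Nat.succ f =>
    if j < (cs.length : Int) then
      match PySem.List.pyGet? cs j with
      | none => j
      | some c =>
        if c == '*' && decide (j + 1 < (cs.length : Int)) && (PySem.List.pyGet? cs (j+1) == some '/') then j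
        else skipBlockB cs f (j+1)
    else j

-- inner loop: while j < n: if text[j]=='\\': j+=2 elif text[j]==q: j+=1; break else: j+=1
def skipStrB (cs : List Char) (fuel : Nat) (q : Char) (j : Int) : Int :=
  match fuel with
  | 0 => j
  | Nat.succ f =>
    if j < (cs.length : Int) then
      match PySem.List.pyGet? cs j with
      | none => j
      | some c =>
        if c == '\\' then skipStrB cs f q (j+2)
        else if c == q then j + 1
        else skipStrB cs f q (j+1)
    else j

-- B's outer while loop: only an index and a depth counter
def findB (cs : List Char) (fuel : Nat) (i depth : Int) : Int :=
  match fuel with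
  | 0 => -1
  | Nat.succ f =>
    if i < (cs.length : Int) then
      match PySem.List.pyGet? cs i with
      | none => -1
      | some ch =>
        let nxt : Option Char := if i + 1 < (cs.length : Int) then PySem.List.pyGet? cs (i+1) else none
        if ch == '/' && nxt == some '/' then
          findB cs f (skipLineB cs f (i+1) + 1) depth
        else if ch == '/' && nxt == some '*' then
          findB cs f (skipBlockB cs f (i+1) + 1) depth
        else if ch == '\'' || ch == '"' || ch == '`' then
          findB cs f (skipStrB cs f ch (i+1)) depth
        else if ch == '(' then
          findB cs f (i+1) (depth+1)
        else if ch == ')' then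
          if depth - 1 == 0 then i else findB cs f (i+1) (depth-1)
        else
          findB cs f (i+1) depth
    else -1

def find_matching_paren_py_alt (text : String) (start : Int) : Int :=
  findB text.toList ((text.toList.length - start).toNat + 1) start 0

-- ===== PRECONDITION & SPEC =====
-- Pre_ excludes exactly start < -len(text), where Python raises IndexError on text[start]
-- (in A and in B alike); A returns normally on every input Pre_ admits.
def Pre_find_matching_paren_py (text : String) (start : Int) : Prop :=
  -(text.toList.length : Int) ≤ start
instance (text : String) (start : Int) : Decidable (Pre_find_matching_paren_py text start) := by
  unfold Pre_find_matching_paren_py; infer_instance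

def pvWitness_find_matching_paren_py : String × Int := ("f('(x)') + (1)", 0)

def Spec_find_matching_paren_py (text : String) (start : Int) (out : Int) : Prop := out = find_matching_paren_py_alt text start
instance (text : String) (start : Int) (out : Int) : Decidable (Spec_find_matching_paren_py text start out) := by unfold Spec_find_matching_paren_py; infer_instance

-- ===== CLAIM (what is proved, stated in full; the proofs are below) =====
def Claim_equal_find_matching_paren_py : Prop := ∀ (text : String) (start : Int), Dom_find_matching_paren_py text start → Pre_find_matching_paren_py text start → Spec_find_matching_paren_py text start (find_matching_paren_py text start)

-- ===== LEMMAS AND PROOFS =====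
theorem pyGet?_isSome_of_bounds (cs : List Char) (i : Int)
    (h1 : -(cs.length : Int) ≤ i) (h2 : i < (cs.length : Int)) :
    ∃ c, PySem.List.pyGet? cs i = some c := by
  cases h : PySem.List.pyGet? cs i with
  | some c => exact ⟨c, rfl⟩
  | none => rw [PySem.List.pyGet?_eq_none_iff] at h; exact absurd ⟨h1, h2⟩ h

theorem skipLineB_ge (cs : List Char) (fuel : Nat) (j : Int) : j ≤ skipLineB cs fuel j := by
  induction fuel generalizing j with
  | zero => simp [skipLineB]
  | succ f ih =>
    simp only [skipLineB]
    split
    · split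
      · omega
      · split
        · omega
        · have := ih (j+1); omega
    · omega

theorem skipBlockB_ge (cs : List Char) (fuel : Nat) (j : Int) : j ≤ skipBlockB cs fuel j := by
  induction fuel generalizing j with
  | zero => simp [skipBlockB]
  | succ f ih =>
    simp only [skipBlockB]
    split
    · split
      · omega
      · split
        · omega
        · have := ih (j+1); omega
    · omega

theorem skipStrB_ge (cs : List Char) (fuel : Nat) (q : Char) (j : Int) : j ≤ skipStrB cs fuel q j := by
  induction fuel generalizing j with
  | zero => simp [skipStrB]
  | succ f ih =>
    simp only [skipStrB]
    split
    · split
      · omega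
      · split
        · have := ih (j+2); omega
        · split
          · omega
          · have := ih (j+1); omega
    · omega

theorem findA_irrel (cs : List Char) (f1 f2 : Nat) (i depth : Int)
    (s d b lc bc e : Bool)
    (h1 : ((cs.length : Int) - i).toNat < f1) (h2 : ((cs.length : Int) - i).toNat < f2) :
    findA cs f1 i depth s d b lc bc e = findA cs f2 i depth s d b lc bc e := by
  induction f1 generalizing f2 i depth s d b lc bc e with
  | zero => omega
  | succ f ih =>
    obtain ⟨g, rfl⟩ : ∃ g, f2 = g + 1 := ⟨f2 - 1, by omega⟩
    by_cases h : i < (cs.length : Int)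
    · cases hc : PySem.List.pyGet? cs i with
      | none => simp only [findA, if_pos h, hc]
      | some c =>
        simp only [findA, if_pos h, hc]
        by_cases c0 : lc = true
        · simp only [c0, if_true]
          exact ih g _ _ _ _ _ _ _ _ (by omega) (by omega)
        · rw [Bool.not_eq_true] at c0
          simp only [c0, Bool.false_eq_true, if_false]
          by_cases c1 : bc = true
          · simp only [c1, if_true]
            exact ih g _ _ _ _ _ _ _ _ (by omega) (by omega)
          · rw [Bool.not_eq_true] at c1
            simp only [c1, Bool.false_eq_true, if_false]
            by_cases c2 : e = true
            · simp only [c2, if_true]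
              exact ih g _ _ _ _ _ _ _ _ (by omega) (by omega)
            · rw [Bool.not_eq_true] at c2
              simp only [c2, Bool.false_eq_true, if_false]
              by_cases c3 : (c == '\\' && (s || d || b)) = true
              · simp only [c3, if_true]
                exact ih g _ _ _ _ _ _ _ _ (by omega) (by omega)
              · rw [Bool.not_eq_true] at c3
                simp only [c3, Bool.false_eq_true, if_false]
                by_cases c4 : s = true
                · simp only [c4, if_true]
                  exact ih g _ _ _ _ _ _ _ _ (by omega) (by omega)
                · rw [Bool.not_eq_true] at c4
                  simp only [c4, Bool.false_eq_true, if_false]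
                  by_cases c5 : d = true
                  · simp only [c5, if_true]
                    exact ih g _ _ _ _ _ _ _ _ (by omega) (by omega)
                  · rw [Bool.not_eq_true] at c5
                    simp only [c5, Bool.false_eq_true, if_false]
                    by_cases c6 : b = true
                    · simp only [c6, if_true]
                      exact ih g _ _ _ _ _ _ _ _ (by omega) (by omega)
                    · rw [Bool.not_eq_true] at c6
                      simp only [c6, Bool.false_eq_true, if_false]
                      by_cases c7 : (c == '/' && (if i + 1 < (cs.length : Int) then PySem.List.pyGet? cs (i+1) else none) == some '/') = true
                      · simp only [c7, if_true]
                        exact ih g _ _ _ _ _ _ _ _ (by omega) (by omega)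
                      · rw [Bool.not_eq_true] at c7
                        simp only [c7, Bool.false_eq_true, if_false]
                        by_cases c8 : (c == '/' && (if i + 1 < (cs.length : Int) then PySem.List.pyGet? cs (i+1) else none) == some '*') = true
                        · simp only [c8, if_true]
                          exact ih g _ _ _ _ _ _ _ _ (by omega) (by omega)
                        · rw [Bool.not_eq_true] at c8
                          simp only [c8, Bool.false_eq_true, if_false]
                          by_cases c9 : (c == '\'') = true
                          · simp only [c9, if_true]
                            exact ih g _ _ _ _ _ _ _ _ (by omega) (by omega)
                          · rw [Bool.not_eq_true] at c9
                            simp only [c9, Bool.false_eq_true, if_false]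
                            by_cases c10 : (c == '"') = true
                            · simp only [c10, if_true]
                              exact ih g _ _ _ _ _ _ _ _ (by omega) (by omega)
                            · rw [Bool.not_eq_true] at c10
                              simp only [c10, Bool.false_eq_true, if_false]
                              by_cases c11 : (c == '`') = true
                              · simp only [c11, if_true]
                                exact ih g _ _ _ _ _ _ _ _ (by omega) (by omega)
                              · rw [Bool.not_eq_true] at c11
                                simp only [c11, Bool.false_eq_true, if_false]
                                by_cases c12 : (c == '(') = true
                                · simp only [c12, if_true]
                                  exact ih g _ _ _ _ _ _ _ _ (by omega) (by omega)
                                · rw [Bool.not_eq_true] at c12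
                                  simp only [c12, Bool.false_eq_true, if_false]
                                  by_cases c13 : (c == ')') = true
                                  · simp only [c13, if_true]
                                    by_cases cd : (depth - 1 == 0) = true
                                    · simp only [cd, if_true]
                                    · rw [Bool.not_eq_true] at cd
                                      simp only [cd, Bool.false_eq_true, if_false]
                                      exact ih g _ _ _ _ _ _ _ _ (by omega) (by omega)
                                  · rw [Bool.not_eq_true] at c13
                                    simp only [c13, Bool.false_eq_true, if_false]
                                    exact ih g _ _ _ _ _ _ _ _ (by omega) (by omega)
    · simp only [findA, if_neg h]

-- A in line-comment state = A back in normal state right after B's newline scan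
theorem findA_line (cs : List Char) (f fs fr : Nat) (j depth : Int)
    (hj : -(cs.length : Int) ≤ j)
    (hf : ((cs.length : Int) - j).toNat < f) (hfs : ((cs.length : Int) - j).toNat < fs)
    (hfr : ((cs.length : Int) - (skipLineB cs fs j + 1)).toNat < fr) :
    findA cs f j depth false false false true false false
      = findA cs fr (skipLineB cs fs j + 1) depth false false false false false false := by
  induction f generalizing fs j with
  | zero => omega
  | succ f ih =>
    obtain ⟨gs, rfl⟩ : ∃ g, fs = g + 1 := ⟨fs - 1, by omega⟩
    by_cases h : j < (cs.length : Int)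
    · obtain ⟨c, hc⟩ := pyGet?_isSome_of_bounds cs j hj h
      by_cases hcn : c = '\n'
      · have hskip : skipLineB cs (gs+1) j = j := by
          rw [skipLineB]; simp [if_pos h, hc, hcn]
        rw [hskip] at hfr ⊢
        rw [findA]; simp [if_pos h, hc, hcn]
        exact findA_irrel cs f fr (j+1) depth _ _ _ _ _ _ (by omega) (by omega)
      · have hskip : skipLineB cs (gs+1) j = skipLineB cs gs (j+1) := by
          rw [skipLineB]; simp [if_pos h, hc, hcn]
        have hb : (!(c == '\n')) = true := by simp [hcn]
        rw [hskip] at hfr ⊢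
        rw [findA]; simp only [if_pos h, hc, hb, if_true]
        exact ih gs (j+1) (by omega) (by omega) (by omega) hfr
    · have hskip : skipLineB cs (gs+1) j = j := by rw [skipLineB]; simp [if_neg h]
      rw [hskip]
      rw [findA]; simp only [if_neg h]
      cases fr with
      | zero => simp [findA]
      | succ g => rw [findA]; simp [if_neg (show ¬ (j+1 < (cs.length : Int)) by omega)]

-- A in block-comment state = A back in normal state at one past B's "*/" scan
theorem findA_block (cs : List Char) (f fs fr : Nat) (j depth : Int)
    (hj : -(cs.length : Int) ≤ j)
    (hf : ((cs.length : Int) - j).toNat < f) (hfs : ((cs.length : Int) - j).toNat < fs)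
    (hfr : ((cs.length : Int) - (skipBlockB cs fs j + 1)).toNat < fr) :
    findA cs f j depth false false false false true false
      = findA cs fr (skipBlockB cs fs j + 1) depth false false false false false false := by
  induction f generalizing fs j with
  | zero => omega
  | succ f ih =>
    obtain ⟨gs, rfl⟩ : ∃ g, fs = g + 1 := ⟨fs - 1, by omega⟩
    by_cases h : j < (cs.length : Int)
    · obtain ⟨c, hc⟩ := pyGet?_isSome_of_bounds cs j hj h
      by_cases hcond : c = '*' ∧ j + 1 < (cs.length : Int) ∧ PySem.List.pyGet? cs (j+1) = some '/'
      · obtain ⟨hc1, hn, hc2⟩ := hcond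
        have hskip : skipBlockB cs (gs+1) j = j := by
          rw [skipBlockB]; simp [if_pos h, hc, hc1, hn, hc2]
        rw [hskip] at hfr ⊢
        rw [findA]; simp [if_pos h, hc, hc1, hn, hc2]
        exact findA_irrel cs f fr (j+1) depth _ _ _ _ _ _ (by omega) (by omega)
      · have hb : (c == '*' && decide (j + 1 < (cs.length : Int)) && (PySem.List.pyGet? cs (j+1) == some '/')) = false := by
          by_cases h1 : c = '*' <;> by_cases h2 : j + 1 < (cs.length : Int) <;>
            simp_all <;> intro hx <;> exact hcond ⟨h1, h2, hx⟩
        have hskip : skipBlockB cs (gs+1) j = skipBlockB cs gs (j+1) := by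
          rw [skipBlockB]; simp only [if_pos h, hc, hb, Bool.false_eq_true, if_false]
        have hb2 : (!(c == '*' && ((if j + 1 < (cs.length : Int) then PySem.List.pyGet? cs (j+1) else none) == some '/'))) = true := by
          by_cases h1 : c = '*' <;> by_cases h2 : j + 1 < (cs.length : Int) <;> simp_all <;>
            intro hx <;> exact hcond ⟨h1, h2, hx⟩
        rw [hskip] at hfr ⊢
        rw [findA]; simp only [if_pos h, hc]
        simp only [hb2, if_true, if_false]
        exact ih gs (j+1) (by omega) (by omega) (by omega) hfr
    · have hskip : skipBlockB cs (gs+1) j = j := by rw [skipBlockB]; simp [if_neg h]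
      rw [hskip]
      rw [findA]; simp only [if_neg h]
      cases fr with
      | zero => simp [findA]
      | succ g => rw [findA]; simp [if_neg (show ¬ (j+1 < (cs.length : Int)) by omega)]

-- A in string state (quote q) = A back in normal state at B's end-of-string scan
theorem findA_str (cs : List Char) (q : Char) (f fs fr : Nat) (j depth : Int)
    (hj : -(cs.length : Int) ≤ j)
    (hf : ((cs.length : Int) - j).toNat < f) (hfs : ((cs.length : Int) - j).toNat < fs)
    (hfr : ((cs.length : Int) - skipStrB cs fs q j).toNat < fr)
    (hq : q = '\'' ∨ q = '"' ∨ q = '`') :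
    findA cs f j depth (q == '\'') (q == '"') (q == '`') false false false
      = findA cs fr (skipStrB cs fs q j) depth false false false false false false := by
  induction f generalizing fs j with
  | zero => omega
  | succ f ih =>
    obtain ⟨gs, rfl⟩ : ∃ g, fs = g + 1 := ⟨fs - 1, by omega⟩
    rcases hq with rfl | rfl | rfl
    · by_cases h : j < (cs.length : Int)
      · obtain ⟨c, hc⟩ := pyGet?_isSome_of_bounds cs j hj h
        by_cases hbs : c = '\\'
        · subst hbs
          have hskip : skipStrB cs (gs+1) '\'' j = skipStrB cs gs '\'' (j+2) := by
            rw [skipStrB]; simp [if_pos h, hc]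
          rw [hskip] at hfr ⊢
          rw [findA]; simp [if_pos h, hc]
          by_cases h2 : j + 1 < (cs.length : Int)
          · obtain ⟨c2, hc2⟩ := pyGet?_isSome_of_bounds cs (j+1) (by omega) h2
            obtain ⟨f', rfl⟩ : ∃ f', f = f' + 1 := ⟨f - 1, by omega⟩
            rw [findA]; simp [if_pos h2, hc2]
            rw [show j+1+1 = j+2 by ring]
            have hrec := ih gs (j+2) (by omega) (by omega) (by omega) hfr
            rw [findA_irrel cs f' (f'+1) (j+2) depth true false false false false false (by omega) (by omega)]
            simpa using hrec
          · have hz : skipStrB cs gs '\'' (j+2) = j + 2 := by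
              cases gs with
              | zero => rfl
              | succ g => rw [skipStrB]; simp [if_neg (show ¬ (j+2 < (cs.length : Int)) by omega)]
            rw [hz] at hfr ⊢
            have hl : findA cs f (j+1) depth true false false false false true = -1 := by
              cases f with
              | zero => rfl
              | succ f2 => rw [findA]; simp [if_neg h2]
            rw [hl]
            cases fr with
            | zero => simp [findA]
            | succ g => rw [findA]; simp [if_neg (show ¬ (j+2 < (cs.length : Int)) by omega)]
        · by_cases hcq : c = '\''
          · have hskip : skipStrB cs (gs+1) '\'' j = j + 1 := by
              rw [skipStrB]; simp [if_pos h, hc, hcq, hbs]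
            rw [hskip] at hfr ⊢
            rw [findA]; simp [if_pos h, hc, hcq, hbs]
            exact findA_irrel cs f fr (j+1) depth _ _ _ _ _ _ (by omega) (by omega)
          · have hskip : skipStrB cs (gs+1) '\'' j = skipStrB cs gs '\'' (j+1) := by
              rw [skipStrB]; simp [if_pos h, hc, hcq, hbs]
            rw [hskip] at hfr ⊢
            rw [findA]
            have hd1 : (c == '\\') = false := by simp [hbs]
            have hd2 : (c == '\'') = false := by simp [hcq]
            simp [if_pos h, hc, hd1, hd2]
            have hrec := ih gs (j+1) (by omega) (by omega) (by omega) hfr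
            simpa using hrec
      · have hskip : skipStrB cs (gs+1) '\'' j = j := by rw [skipStrB]; simp [if_neg h]
        rw [hskip]
        rw [findA]; simp only [if_neg h]
        cases fr with
        | zero => simp [findA]
        | succ g => rw [findA]; simp [if_neg h]
    · by_cases h : j < (cs.length : Int)
      · obtain ⟨c, hc⟩ := pyGet?_isSome_of_bounds cs j hj h
        by_cases hbs : c = '\\'
        · subst hbs
          have hskip : skipStrB cs (gs+1) '"' j = skipStrB cs gs '"' (j+2) := by
            rw [skipStrB]; simp [if_pos h, hc]
          rw [hskip] at hfr ⊢
          rw [findA]; simp [if_pos h, hc]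
          by_cases h2 : j + 1 < (cs.length : Int)
          · obtain ⟨c2, hc2⟩ := pyGet?_isSome_of_bounds cs (j+1) (by omega) h2
            obtain ⟨f', rfl⟩ : ∃ f', f = f' + 1 := ⟨f - 1, by omega⟩
            rw [findA]; simp [if_pos h2, hc2]
            rw [show j+1+1 = j+2 by ring]
            have hrec := ih gs (j+2) (by omega) (by omega) (by omega) hfr
            rw [findA_irrel cs f' (f'+1) (j+2) depth false true false false false false (by omega) (by omega)]
            simpa using hrec
          · have hz : skipStrB cs gs '"' (j+2) = j + 2 := by
              cases gs with
              | zero => rfl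
              | succ g => rw [skipStrB]; simp [if_neg (show ¬ (j+2 < (cs.length : Int)) by omega)]
            rw [hz] at hfr ⊢
            have hl : findA cs f (j+1) depth false true false false false true = -1 := by
              cases f with
              | zero => rfl
              | succ f2 => rw [findA]; simp [if_neg h2]
            rw [hl]
            cases fr with
            | zero => simp [findA]
            | succ g => rw [findA]; simp [if_neg (show ¬ (j+2 < (cs.length : Int)) by omega)]
        · by_cases hcq : c = '"'
          · have hskip : skipStrB cs (gs+1) '"' j = j + 1 := by
              rw [skipStrB]; simp [if_pos h, hc, hcq, hbs]
            rw [hskip] at hfr ⊢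
            rw [findA]; simp [if_pos h, hc, hcq, hbs]
            exact findA_irrel cs f fr (j+1) depth _ _ _ _ _ _ (by omega) (by omega)
          · have hskip : skipStrB cs (gs+1) '"' j = skipStrB cs gs '"' (j+1) := by
              rw [skipStrB]; simp [if_pos h, hc, hcq, hbs]
            rw [hskip] at hfr ⊢
            rw [findA]
            have hd1 : (c == '\\') = false := by simp [hbs]
            have hd2 : (c == '"') = false := by simp [hcq]
            simp [if_pos h, hc, hd1, hd2]
            have hrec := ih gs (j+1) (by omega) (by omega) (by omega) hfr
            simpa using hrec
      · have hskip : skipStrB cs (gs+1) '"' j = j := by rw [skipStrB]; simp [if_neg h]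
        rw [hskip]
        rw [findA]; simp only [if_neg h]
        cases fr with
        | zero => simp [findA]
        | succ g => rw [findA]; simp [if_neg h]
    · by_cases h : j < (cs.length : Int)
      · obtain ⟨c, hc⟩ := pyGet?_isSome_of_bounds cs j hj h
        by_cases hbs : c = '\\'
        · subst hbs
          have hskip : skipStrB cs (gs+1) '`' j = skipStrB cs gs '`' (j+2) := by
            rw [skipStrB]; simp [if_pos h, hc]
          rw [hskip] at hfr ⊢
          rw [findA]; simp [if_pos h, hc]
          by_cases h2 : j + 1 < (cs.length : Int)
          · obtain ⟨c2, hc2⟩ := pyGet?_isSome_of_bounds cs (j+1) (by omega) h2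
            obtain ⟨f', rfl⟩ : ∃ f', f = f' + 1 := ⟨f - 1, by omega⟩
            rw [findA]; simp [if_pos h2, hc2]
            rw [show j+1+1 = j+2 by ring]
            have hrec := ih gs (j+2) (by omega) (by omega) (by omega) hfr
            rw [findA_irrel cs f' (f'+1) (j+2) depth false false true false false false (by omega) (by omega)]
            simpa using hrec
          · have hz : skipStrB cs gs '`' (j+2) = j + 2 := by
              cases gs with
              | zero => rfl
              | succ g => rw [skipStrB]; simp [if_neg (show ¬ (j+2 < (cs.length : Int)) by omega)]
            rw [hz] at hfr ⊢
            have hl : findA cs f (j+1) depth false false true false false true = -1 := by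
              cases f with
              | zero => rfl
              | succ f2 => rw [findA]; simp [if_neg h2]
            rw [hl]
            cases fr with
            | zero => simp [findA]
            | succ g => rw [findA]; simp [if_neg (show ¬ (j+2 < (cs.length : Int)) by omega)]
        · by_cases hcq : c = '`'
          · have hskip : skipStrB cs (gs+1) '`' j = j + 1 := by
              rw [skipStrB]; simp [if_pos h, hc, hcq, hbs]
            rw [hskip] at hfr ⊢
            rw [findA]; simp [if_pos h, hc, hcq, hbs]
            exact findA_irrel cs f fr (j+1) depth _ _ _ _ _ _ (by omega) (by omega)
          · have hskip : skipStrB cs (gs+1) '`' j = skipStrB cs gs '`' (j+1) := by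
              rw [skipStrB]; simp [if_pos h, hc, hcq, hbs]
            rw [hskip] at hfr ⊢
            rw [findA]
            have hd1 : (c == '\\') = false := by simp [hbs]
            have hd2 : (c == '`') = false := by simp [hcq]
            simp [if_pos h, hc, hd1, hd2]
            have hrec := ih gs (j+1) (by omega) (by omega) (by omega) hfr
            simpa using hrec
      · have hskip : skipStrB cs (gs+1) '`' j = j := by rw [skipStrB]; simp [if_neg h]
        rw [hskip]
        rw [findA]; simp only [if_neg h]
        cases fr with
        | zero => simp [findA]
        | succ g => rw [findA]; simp [if_neg h]

-- main loop correspondence: A with all flags clear = B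
theorem findA_eq_findB (cs : List Char) (fa fb : Nat) (i depth : Int)
    (hi : -(cs.length : Int) ≤ i)
    (hfa : ((cs.length : Int) - i).toNat < fa) (hfb : ((cs.length : Int) - i).toNat < fb) :
    findA cs fa i depth false false false false false false = findB cs fb i depth := by
  induction fa generalizing fb i depth with
  | zero => omega
  | succ f ih =>
    obtain ⟨g, rfl⟩ : ∃ g, fb = g + 1 := ⟨fb - 1, by omega⟩
    by_cases h : i < (cs.length : Int)
    · obtain ⟨c, hc⟩ := pyGet?_isSome_of_bounds cs i hi h
      rw [findA, findB]
      by_cases hsl : c = '/'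
      · by_cases hn1 : (if i + 1 < (cs.length : Int) then PySem.List.pyGet? cs (i+1) else none) = some '/'
        · simp [if_pos h, hc, hsl, hn1]
          rw [findA_line cs f g f (i+1) depth (by omega) (by omega) (by omega)
            (by have := skipLineB_ge cs g (i+1); omega)]
          exact ih g (skipLineB cs g (i+1) + 1) depth
            (by have := skipLineB_ge cs g (i+1); omega)
            (by have := skipLineB_ge cs g (i+1); omega)
            (by have := skipLineB_ge cs g (i+1); omega)
        · by_cases hn2 : (if i + 1 < (cs.length : Int) then PySem.List.pyGet? cs (i+1) else none) = some '*'
          · simp [if_pos h, hc, hsl, hn1, hn2]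
            rw [findA_block cs f g f (i+1) depth (by omega) (by omega) (by omega)
              (by have := skipBlockB_ge cs g (i+1); omega)]
            exact ih g (skipBlockB cs g (i+1) + 1) depth
              (by have := skipBlockB_ge cs g (i+1); omega)
              (by have := skipBlockB_ge cs g (i+1); omega)
              (by have := skipBlockB_ge cs g (i+1); omega)
          · simp [if_pos h, hc, hsl, hn1, hn2]
            exact ih g (i+1) depth (by omega) (by omega) (by omega)
      · by_cases hq1 : c = '\''
        · simp [if_pos h, hc, hq1]
          have hstr := findA_str cs '\'' f g f (i+1) depth (by omega) (by omega) (by omega)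
            (by have := skipStrB_ge cs g '\'' (i+1); omega) (by simp)
          simp only [show ('\''=='\'') = true by decide, show ('\''=='"') = false by decide,
            show ('\''=='`') = false by decide] at hstr
          rw [hstr]
          exact ih g (skipStrB cs g '\'' (i+1)) depth
            (by have := skipStrB_ge cs g '\'' (i+1); omega)
            (by have := skipStrB_ge cs g '\'' (i+1); omega)
            (by have := skipStrB_ge cs g '\'' (i+1); omega)
        · by_cases hq2 : c = '"'
          · simp [if_pos h, hc, hq2]
            have hstr := findA_str cs '"' f g f (i+1) depth (by omega) (by omega) (by omega)
              (by have := skipStrB_ge cs g '"' (i+1); omega) (by simp)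
            simp only [show ('"'=='\'') = false by decide, show ('"'=='"') = true by decide,
              show ('"'=='`') = false by decide] at hstr
            rw [hstr]
            exact ih g (skipStrB cs g '"' (i+1)) depth
              (by have := skipStrB_ge cs g '"' (i+1); omega)
              (by have := skipStrB_ge cs g '"' (i+1); omega)
              (by have := skipStrB_ge cs g '"' (i+1); omega)
          · by_cases hq3 : c = '`'
            · simp [if_pos h, hc, hq3]
              have hstr := findA_str cs '`' f g f (i+1) depth (by omega) (by omega) (by omega)
                (by have := skipStrB_ge cs g '`' (i+1); omega) (by simp)
              simp only [show ('`'=='\'') = false by decide, show ('`'=='"') = false by decide,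
                show ('`'=='`') = true by decide] at hstr
              rw [hstr]
              exact ih g (skipStrB cs g '`' (i+1)) depth
                (by have := skipStrB_ge cs g '`' (i+1); omega)
                (by have := skipStrB_ge cs g '`' (i+1); omega)
                (by have := skipStrB_ge cs g '`' (i+1); omega)
            · by_cases hp1 : c = '('
              · simp [if_pos h, hc, hp1, hsl, hq1, hq2, hq3]
                exact ih g (i+1) (depth+1) (by omega) (by omega) (by omega)
              · by_cases hp2 : c = ')'
                · simp [if_pos h, hc, hp2, hsl, hq1, hq2, hq3]
                  by_cases hd : depth - 1 = 0
                  · simp [hd]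
                  · simp [hd]
                    exact ih g (i+1) (depth-1) (by omega) (by omega) (by omega)
                · simp [if_pos h, hc, hsl, hq1, hq2, hq3, hp1, hp2]
                  exact ih g (i+1) depth (by omega) (by omega) (by omega)
    · rw [findA, findB]; simp [if_neg h]

-- ===== VERDICT (by name: the statement is the Claim_ definition above) =====
theorem find_matching_paren_py_spec : Claim_equal_find_matching_paren_py := by
  intro text start _ hpre
  unfold Spec_find_matching_paren_py find_matching_paren_py find_matching_paren_py_alt
  exact findA_eq_findB _ _ _ _ _ hpre (by omega) (by omega)
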